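-- pv_equiv track=rewrite | github.com/ophintor/AoC2021 | day18.py | get_index_of_next_number_on_the_right
-- ===== SOURCE A (Python) =====
-- def get_index_of_next_number_on_the_right(sf_number, i):
--     distance = 0
--     while i < len(sf_number):
--         if sf_number[i] == "]":
--             distance += 1
--             i += 1
--         elif sf_number[i] in ("[", ","):
--             i += 1
--         else:
--             return i, distance
--     return None, distance
-- ===== SOURCE B (Python) =====
-- def get_index_of_next_number_on_the_right(sf_number, i):
--     n = len(sf_number)
--     idx = next((j for j in range(i, n) if sf_number[j] not in "[],"), None)
--     if idx is None:
--         return None, sf_number.count("]", i, n)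
--     return idx, sf_number.count("]", i, idx)
-- ===== Notes on version B (the rewrite author's own statement) =====
-- stated objective: idiomatic
-- what changed: Replaces A's single stateful while-loop (counting and advancing an index) by two independent passes: first find the index of the first non-bracket character at or after i, then count ']' over the slice up to that index (or to the end).
-- outside the precondition, e.g. on get_index_of_next_number_on_the_right(']]', -2): A returns (None, 4), B returns (None, 2)
import Mathlib
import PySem

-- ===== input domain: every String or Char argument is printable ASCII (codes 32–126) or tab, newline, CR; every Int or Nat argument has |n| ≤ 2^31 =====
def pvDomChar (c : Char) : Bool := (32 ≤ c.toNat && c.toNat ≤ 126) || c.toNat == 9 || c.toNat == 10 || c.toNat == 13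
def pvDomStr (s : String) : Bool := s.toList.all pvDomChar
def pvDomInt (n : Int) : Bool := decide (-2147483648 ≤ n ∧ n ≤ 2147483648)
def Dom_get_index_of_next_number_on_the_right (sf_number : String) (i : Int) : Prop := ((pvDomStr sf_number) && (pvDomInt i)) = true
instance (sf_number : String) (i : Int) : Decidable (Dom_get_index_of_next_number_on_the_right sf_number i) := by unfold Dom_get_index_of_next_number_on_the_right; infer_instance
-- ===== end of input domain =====

-- B replaces A's single stateful scanning loop by two independent passes (find the first
-- non-bracket index, then count ']' on the slice up to it) — objective: idiomatic, same cost.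

-- ===== PORT A =====
-- the while-loop of A, one recursive step per iteration; fuel bounds len - i, which shrinks by 1
def goA (cs : List Char) (i d : Int) (fuel : Nat) : Option Int × Int :=
  match fuel with
  | 0 => (none, d)
  | fuel + 1 =>
    if i < (cs.length : Int) then
      match PySem.List.pyGet? cs i with
      | some c =>
        if c = ']' then goA cs (i + 1) (d + 1) fuel
        else if c = '[' ∨ c = ',' then goA cs (i + 1) d fuel
        else (some i, d)
      | none => (none, d)   -- IndexError (negative i below -len); excluded by Pre_
    else (none, d)

def get_index_of_next_number_on_the_right (sf_number : String) (i : Int) : Option Int × Int :=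
  goA sf_number.toList i 0 (((sf_number.toList.length : Int) - i).toNat + 1)

-- ===== PORT B =====
-- the generator 'next((j for j in range(i, n) if sf_number[j] not in "[],"), None)'
def bFind (cs : List Char) (js : List Int) : Option Int :=
  match js with
  | [] => none
  | j :: rest =>
    match PySem.List.pyGet? cs j with
    | some c => if ¬ (c = '[' ∨ c = ']' ∨ c = ',') then some j else bFind cs rest
    | none => none   -- IndexError inside the generator; excluded by Pre_

def get_index_of_next_number_on_the_right_alt (sf_number : String) (i : Int) : Option Int × Int :=
  let cs := sf_number.toList
  let n : Int := cs.length
  match bFind cs (PySem.List.pyRange i n 1) with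
  | none => (none, (PySem.List.count (PySem.List.slice cs (some i) (some n)) ']' : Int))
  | some idx => (some idx, (PySem.List.count (PySem.List.slice cs (some i) (some idx)) ']' : Int))

-- ===== PRECONDITION & SPEC =====
-- Pre_ excludes negative i, a corner no caller of this scanning helper reaches: there A raises
-- IndexError (i < -len) or returns a value produced by Python's accidental negative-index
-- wraparound (-len ≤ i < 0), while B's range/slice passes treat the start differently.
def Pre_get_index_of_next_number_on_the_right (sf_number : String) (i : Int) : Prop := 0 ≤ i
instance (sf_number : String) (i : Int) : Decidable (Pre_get_index_of_next_number_on_the_right sf_number i) := by unfold Pre_get_index_of_next_number_on_the_right; infer_instance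
def pvWitness_get_index_of_next_number_on_the_right : String × Int := ("[3,[41,5]]", 2)

def Spec_get_index_of_next_number_on_the_right (sf_number : String) (i : Int) (out : Option Int × Int) : Prop := out = get_index_of_next_number_on_the_right_alt sf_number i
instance (sf_number : String) (i : Int) (out : Option Int × Int) : Decidable (Spec_get_index_of_next_number_on_the_right sf_number i out) := by unfold Spec_get_index_of_next_number_on_the_right; infer_instance

-- ===== CLAIM (what is proved, stated in full; the proofs are below) =====
def Claim_equal_get_index_of_next_number_on_the_right : Prop := ∀ (sf_number : String) (i : Int), Dom_get_index_of_next_number_on_the_right sf_number i → Pre_get_index_of_next_number_on_the_right sf_number i → Spec_get_index_of_next_number_on_the_right sf_number i (get_index_of_next_number_on_the_right sf_number i)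

-- ===== LEMMAS AND PROOFS =====

lemma bFind_mem {cs : List Char} {js : List Int} {idx : Int} (h : bFind cs js = some idx) : idx ∈ js := by
  induction js with
  | nil => simp [bFind] at h
  | cons j rest ih =>
    simp only [bFind] at h
    cases hg : PySem.List.pyGet? cs j with
    | none => simp [hg] at h
    | some c =>
      simp only [hg] at h
      split at h
      · simp at h; simp [h]
      · exact List.mem_cons_of_mem _ (ih h)

-- slice cons step: peeling the head character at position i
lemma slice_cons_step (cs : List Char) (i X : Int) (h0 : 0 ≤ i) (hlt : i < (cs.length : Int)) (hX : i + 1 ≤ X) :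
    PySem.List.slice cs (some i) (some X) =
      cs[i.toNat]'(by omega) :: PySem.List.slice cs (some (i + 1)) (some X) := by
  rw [PySem.List.slice_toNat cs h0 (by omega), PySem.List.slice_toNat cs (by omega : (0:Int) ≤ i + 1) (by omega)]
  have hi : i.toNat < cs.length := by omega
  rw [List.drop_eq_getElem_cons hi]
  have h1 : (i + 1).toNat = i.toNat + 1 := by omega
  have h2 : X.toNat - i.toNat = (X.toNat - (i.toNat + 1)) + 1 := by omega
  rw [h1, h2, List.take_succ_cons]

lemma slice_empty_of_ge (cs : List Char) (i X : Int) (h0 : 0 ≤ X) (h : X ≤ i) :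
    PySem.List.slice cs (some i) (some X) = [] := by
  rw [PySem.List.slice_toNat cs (by omega) h0]
  have : X.toNat - i.toNat = 0 := by omega
  simp [this]

lemma key (cs : List Char) (fuel : Nat) : ∀ i d : Int, 0 ≤ i → (cs.length : Int) - i ≤ fuel →
    goA cs i d fuel =
      (match bFind cs (PySem.List.pyRange i cs.length 1) with
       | none => (none, d + (PySem.List.count (PySem.List.slice cs (some i) (some (cs.length : Int))) ']' : Int))
       | some idx => (some idx, d + (PySem.List.count (PySem.List.slice cs (some i) (some idx)) ']' : Int))) := by
  induction fuel with
  | zero =>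
    intro i d h0 hf
    have hge : (cs.length : Int) ≤ i := by omega
    rw [PySem.List.pyRange_one_eq_nil hge]
    simp [goA, bFind, slice_empty_of_ge cs i (cs.length : Int) (by positivity) hge]
  | succ fuel ih =>
    intro i d h0 hf
    by_cases hlt : i < (cs.length : Int)
    · have hget : PySem.List.pyGet? cs i = some (cs[i.toNat]'(by omega)) :=
        PySem.List.pyGet?_eq_some_getElem _ h0 hlt
      rw [PySem.List.pyRange_one_cons hlt]
      simp only [goA, bFind, hget, if_pos hlt]
      set c := cs[i.toNat]'(by omega) with hc
      by_cases hnum : ¬ (c = '[' ∨ c = ']' ∨ c = ',')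
      · -- number char: both stop at i
        have hne1 : ¬ c = ']' := fun h => hnum (Or.inr (Or.inl h))
        have hne2 : ¬ (c = '[' ∨ c = ',') := fun h => hnum (h.elim (Or.inl) (fun h => Or.inr (Or.inr h)))
        simp [hne1, hne2, hnum, slice_empty_of_ge cs i i h0 le_rfl]
      · push_neg at hnum
        simp only [if_neg (not_not_intro hnum)]
        rcases Decidable.em (c = ']') with hbr | hbr
        · -- ']' : distance increments
          rw [if_pos hbr, ih (i + 1) (d + 1) (by omega) (by omega)]
          cases hB : bFind cs (PySem.List.pyRange (i + 1) (cs.length : Int) 1) with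
          | none =>
            simp only [hB]
            rw [slice_cons_step cs i (cs.length : Int) h0 hlt (by omega)]
            rw [← hc, hbr]
            simp [List.count_cons]; ring_nf
          | some idx =>
            have hmem := bFind_mem hB
            rw [PySem.List.mem_pyRange_one] at hmem
            simp only [hB]
            rw [slice_cons_step cs i idx h0 hlt (by omega)]
            rw [← hc, hbr]
            simp [List.count_cons]; ring_nf
        · -- '[' or ',' : skip without counting
          have hbc : c = '[' ∨ c = ',' := by
            rcases hnum with h | h | h
            · exact Or.inl h
            · exact absurd h hbr
            · exact Or.inr h
          rw [if_neg hbr, if_pos hbc, ih (i + 1) d (by omega) (by omega)]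
          cases hB : bFind cs (PySem.List.pyRange (i + 1) (cs.length : Int) 1) with
          | none =>
            simp only [hB]
            rw [slice_cons_step cs i (cs.length : Int) h0 hlt (by omega)]
            have : ¬ (cs[i.toNat]'(by omega)) = ']' := by rw [← hc]; exact hbr
            simp [List.count_cons, this]
          | some idx =>
            have hmem := bFind_mem hB
            rw [PySem.List.mem_pyRange_one] at hmem
            simp only [hB]
            rw [slice_cons_step cs i idx h0 hlt (by omega)]
            have : ¬ (cs[i.toNat]'(by omega)) = ']' := by rw [← hc]; exact hbr
            simp [List.count_cons, this]
    · have hge : (cs.length : Int) ≤ i := by omega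
      rw [PySem.List.pyRange_one_eq_nil hge]
      simp [goA, bFind, hlt, slice_empty_of_ge cs i (cs.length : Int) (by positivity) hge]

-- ===== VERDICT (by name: the statement is the Claim_ definition above) =====
theorem get_index_of_next_number_on_the_right_spec : Claim_equal_get_index_of_next_number_on_the_right := by
  intro s i _ hpre
  unfold Spec_get_index_of_next_number_on_the_right
  unfold get_index_of_next_number_on_the_right get_index_of_next_number_on_the_right_alt
  rw [key s.toList _ i 0 hpre (by omega)]
  cases hB : bFind s.toList (PySem.List.pyRange i (s.toList.length : Int) 1) <;> simp only [hB] <;> simp
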